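-- pv_equiv track=rewrite | github.com/ilnrzakirov/Python_basic | Module20/06_pairs/main.py | great_list
-- ===== SOURCE A (Python) =====
-- def great_list(number_list):
--     number_list1 = []
--     number_list2 = []
--     cnt = 0
--     for num in number_list:
--         if cnt % 2 == 0:
--             number_list1.append(num)
--         else:
--             number_list2.append(num)
--         cnt += 1
--     result = zip(number_list1, number_list2)
--     return result
-- ===== SOURCE B (Python) =====
-- def great_list(number_list):
--     it = iter(list(number_list))
--     return zip(it, it)
-- ===== Notes on version B (the rewrite author's own statement) =====
-- stated objective: idiomatic
-- what changed: Replaces the parity-counter loop building two partition lists with the shared-iterator grouper idiom zip(it, it) over one iterator, pulling adjacent elements directly into pairs.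
import Mathlib
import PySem

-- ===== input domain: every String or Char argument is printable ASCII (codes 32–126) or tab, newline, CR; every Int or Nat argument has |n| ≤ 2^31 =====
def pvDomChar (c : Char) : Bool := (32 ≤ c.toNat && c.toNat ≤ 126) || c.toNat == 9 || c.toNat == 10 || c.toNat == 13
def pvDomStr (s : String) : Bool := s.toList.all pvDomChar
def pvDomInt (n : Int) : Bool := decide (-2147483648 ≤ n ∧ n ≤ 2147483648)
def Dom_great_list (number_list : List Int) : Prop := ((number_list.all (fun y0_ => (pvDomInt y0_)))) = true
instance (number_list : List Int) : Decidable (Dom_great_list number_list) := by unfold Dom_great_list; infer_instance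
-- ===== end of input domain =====

-- B pairs adjacent elements by pulling twice from one shared iterator (zip(it, it)) instead of
-- A's parity counter splitting into two lists and zipping them: same values, plainer decomposition.

-- ===== PORT A =====
-- the for-loop over number_list with state (number_list1, number_list2, cnt), then zip of the two lists
def great_list (number_list : List Int) : List (List Int) :=
  let s := number_list.foldl
    (fun (st : List Int × List Int × Int) num =>
      if PySem.Int.mod st.2.2 2 == 0 then (st.1 ++ [num], st.2.1, st.2.2 + 1)
      else (st.1, st.2.1 ++ [num], st.2.2 + 1))
    ([], [], 0)
  (s.1.zip s.2.1).map (fun p => [p.1, p.2])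

-- ===== PORT B =====
-- zip(it, it) on one shared iterator: each step pulls two consecutive elements, stops when fewer remain
def great_list_alt (number_list : List Int) : List (List Int) :=
  match number_list with
  | a :: b :: rest => [a, b] :: great_list_alt rest
  | _ => []

-- ===== PRECONDITION & SPEC =====
def Spec_great_list (number_list : List Int) (out : List (List Int)) : Prop := out = great_list_alt number_list
instance (number_list : List Int) (out : List (List Int)) : Decidable (Spec_great_list number_list out) := by unfold Spec_great_list; infer_instance

-- ===== CLAIM (what is proved, stated in full; the proofs are below) =====
def Claim_equal_great_list : Prop := ∀ (number_list : List Int), Dom_great_list number_list → Spec_great_list number_list (great_list number_list)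

-- ===== LEMMAS AND PROOFS =====

-- elements of number_list at even / odd positions
mutual
def pvEv : List Int → List Int
  | [] => []
  | a :: t => a :: pvOd t
def pvOd : List Int → List Int
  | [] => []
  | _ :: t => pvEv t
end

theorem pv_foldl_inv (nl : List Int) : ∀ (l1 l2 : List Int) (c : Int),
    nl.foldl
      (fun (st : List Int × List Int × Int) num =>
        if PySem.Int.mod st.2.2 2 == 0 then (st.1 ++ [num], st.2.1, st.2.2 + 1)
        else (st.1, st.2.1 ++ [num], st.2.2 + 1))
      (l1, l2, c)
    = if PySem.Int.mod c 2 == 0 then (l1 ++ pvEv nl, l2 ++ pvOd nl, c + nl.length)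
      else (l1 ++ pvOd nl, l2 ++ pvEv nl, c + nl.length) := by
  induction nl with
  | nil => intro l1 l2 c; split <;> simp [pvEv, pvOd]
  | cons a t ih =>
    intro l1 l2 c
    have hpar : PySem.Int.mod (c + 1) 2 = if PySem.Int.mod c 2 = 0 then 1 else 0 := by
      have h0 := PySem.Int.mod_nonneg c (b := 2) (by omega)
      have h1 := PySem.Int.mod_lt c (b := 2) (by omega)
      have h2 := PySem.Int.floordiv_mul_add_mod c 2
      have h0' := PySem.Int.mod_nonneg (c + 1) (b := 2) (by omega)
      have h1' := PySem.Int.mod_lt (c + 1) (b := 2) (by omega)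
      have h2' := PySem.Int.floordiv_mul_add_mod (c + 1) 2
      split <;> omega
    by_cases hc : PySem.Int.mod c 2 = 0
    · have h1 : PySem.Int.mod (c + 1) 2 = 1 := by rw [hpar, if_pos hc]
      rw [List.foldl_cons, if_pos (beq_iff_eq.mpr hc), ih,
        if_neg (by simp only [h1]; decide), if_pos (beq_iff_eq.mpr hc)]
      simp [pvEv, pvOd]
      push_cast; ring
    · have h1 : PySem.Int.mod (c + 1) 2 = 0 := by rw [hpar, if_neg hc]
      rw [List.foldl_cons, if_neg (fun h => hc (beq_iff_eq.mp h)), ih,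
        if_pos (beq_iff_eq.mpr h1), if_neg (fun h => hc (beq_iff_eq.mp h))]
      simp [pvEv, pvOd]
      push_cast; ring

theorem pv_zip_ev_od : ∀ (nl : List Int),
    ((pvEv nl).zip (pvOd nl)).map (fun p => [p.1, p.2]) = great_list_alt nl
  | [] => rfl
  | [_] => rfl
  | a :: b :: t => by
    simp [pvEv, pvOd, great_list_alt, pv_zip_ev_od t]

-- ===== VERDICT (by name: the statement is the Claim_ definition above) =====
theorem great_list_spec : Claim_equal_great_list := by
  intro nl _
  unfold Spec_great_list great_list
  rw [pv_foldl_inv nl [] [] 0]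
  simp [pv_zip_ev_od]
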